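-- pv_equiv track=rewrite | github.com/gridvisi/Python_workspace | 4 ddm_course/字符串/6 kyu Decode Diagonal.py | get_diagonale_code
-- ===== SOURCE A (Python) =====
-- def get_diagonale_code(grid):
--     grid = [line.split() for line in grid.split("\n")]
--     i, j, d, word = 0, 0, 1, ""
--     while 0 <= i < len(grid) and j < len(grid[i]):
--         if 0 <= j < len(grid[i]):
--             word += grid[i][j]
--             i, j = i + d, j + 1
--         else: i += d
--         if i == 0 or i == len(grid) - 1: d = -d
--     return word
-- ===== SOURCE B (Python) =====
-- def get_diagonale_code(grid):
--     # Closed-form triangle wave over columns instead of simulating the bouncing walk.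
--     rows = [line.split() for line in grid.split("\n")]
--     n = len(rows)
--     out = []
--     j = 0
--     while True:
--         if n == 1:
--             r = j  # degenerate grid: the walk has no lower wall, it leaves after the first row
--         else:
--             p = j % (2 * (n - 1))
--             r = p if p < n else 2 * (n - 1) - p
--         if r < n and j < len(rows[r]):
--             out.append(rows[r][j])
--             j += 1
--         else:
--             return "".join(out)
-- ===== Notes on version B (the rewrite author's own statement) =====
-- stated objective: alternative
-- what changed: B replaces A's step-by-step simulation of the bouncing walk (mutable row index and direction flag flipped at the walls) by a closed-form triangle-wave formula that computes the visited row directly from the column index.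
import Mathlib
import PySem

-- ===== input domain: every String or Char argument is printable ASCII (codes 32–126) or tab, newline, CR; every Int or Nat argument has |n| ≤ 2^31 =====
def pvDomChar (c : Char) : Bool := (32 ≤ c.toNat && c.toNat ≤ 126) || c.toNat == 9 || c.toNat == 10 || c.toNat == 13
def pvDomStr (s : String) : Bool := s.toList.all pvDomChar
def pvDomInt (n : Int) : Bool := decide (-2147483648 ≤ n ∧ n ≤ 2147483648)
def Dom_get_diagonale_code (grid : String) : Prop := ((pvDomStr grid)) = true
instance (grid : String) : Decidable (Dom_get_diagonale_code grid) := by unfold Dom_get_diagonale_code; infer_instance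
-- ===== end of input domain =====

-- B replaces A's simulated bouncing walk by a closed-form triangle-wave row index per column (alternative decomposition, same cost).


-- ===== PORT A =====
-- grid[i] (guarded by 0 <= i < len(grid) in A's conditions), totalised with getD []
def pvRowA (g : List (List (List Char))) (i : Int) : List (List Char) :=
  (PySem.List.pyGet? g i).getD []

-- the while loop of A, state (i, j, d, word); fuel is a strict bound on the iterations
def pvALoop (g : List (List (List Char))) : Nat → Int → Int → Int → List Char → List Char
  | 0, _i, _j, _d, word => word
  | f+1, i, j, d, word =>
    if 0 ≤ i ∧ i < (g.length : Int) ∧ j < ((pvRowA g i).length : Int) then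
      if 0 ≤ j ∧ j < ((pvRowA g i).length : Int) then
        pvALoop g f (i + d) (j + 1)
          (if i + d = 0 ∨ i + d = (g.length : Int) - 1 then -d else d)
          (word ++ ((PySem.List.pyGet? (pvRowA g i) j).getD []))
      else
        pvALoop g f (i + d) j
          (if i + d = 0 ∨ i + d = (g.length : Int) - 1 then -d else d) word
    else word

def get_diagonale_code (grid : String) : String :=
  let g := (PySem.Chars.splitOn grid.toList ['\n']).map PySem.Chars.split₀
  String.ofList (pvALoop g ((g.map List.length).sum + 1) 0 0 1 [])

-- ===== PORT B =====
-- row visited at column j: closed-form triangle wave (degenerate n = 1: walk leaves after the first row)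
def pvWaveRow (n j : Nat) : Nat :=
  if n = 1 then j
  else if j % (2 * (n - 1)) < n then j % (2 * (n - 1)) else 2 * (n - 1) - j % (2 * (n - 1))

def pvBLoop (g : List (List (List Char))) : Nat → Nat → List (List Char) → List (List Char)
  | 0, _j, out => out
  | f+1, j, out =>
    if pvWaveRow g.length j < g.length ∧ j < (g.getD (pvWaveRow g.length j) []).length then
      pvBLoop g f (j+1) (out ++ [(g.getD (pvWaveRow g.length j) []).getD j []])
    else out

def get_diagonale_code_alt (grid : String) : String :=
  let g := (PySem.Chars.splitOn grid.toList ['\n']).map PySem.Chars.split₀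
  String.ofList (PySem.Chars.join [] (pvBLoop g ((g.map List.length).sum + 1) 0 []))

-- ===== PRECONDITION & SPEC =====
def Spec_get_diagonale_code (grid : String) (out : String) : Prop := out = get_diagonale_code_alt grid
instance (grid : String) (out : String) : Decidable (Spec_get_diagonale_code grid out) := by unfold Spec_get_diagonale_code; infer_instance

-- ===== CLAIM (what is proved, stated in full; the proofs are below) =====
def Claim_equal_get_diagonale_code : Prop := ∀ (grid : String), Dom_get_diagonale_code grid → Spec_get_diagonale_code grid (get_diagonale_code grid)

-- ===== LEMMAS AND PROOFS =====
theorem pv_join_nil_eq_flatten (l : List (List Char)) : PySem.Chars.join [] l = l.flatten := by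
  induction l with
  | nil => rfl
  | cons a t ih =>
    cases t with
    | nil => simp [PySem.Chars.join, List.intercalate]
    | cons b t' =>
      rw [PySem.Chars.join_cons_cons]
      simp only [List.flatten_cons] at *
      simp [ih]

theorem pv_mod_succ (j P : Nat) (hP : 2 ≤ P) :
    (j+1) % P = if j % P + 1 = P then 0 else j % P + 1 := by
  have h := Nat.mod_lt j (show 0 < P by omega)
  rw [Nat.add_mod, Nat.mod_eq_of_lt (show 1 < P by omega)]
  split_ifs with h1
  · rw [h1, Nat.mod_self]
  · rw [Nat.mod_eq_of_lt (by omega)]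

-- one lockstep step of the wave: A's (i, d) after the move matches the closed form at j+1
theorem pv_wave_step (n j : Nat) (hn : 2 ≤ n) :
    ((pvWaveRow n j : Int) + (if j % (2*(n-1)) < n-1 then (1:Int) else -1) = (pvWaveRow n (j+1) : Int)) ∧
    ((if ((pvWaveRow n j : Int) + (if j % (2*(n-1)) < n-1 then (1:Int) else -1)) = 0 ∨
         ((pvWaveRow n j : Int) + (if j % (2*(n-1)) < n-1 then (1:Int) else -1)) = (n : Int) - 1
       then -(if j % (2*(n-1)) < n-1 then (1:Int) else -1)
       else (if j % (2*(n-1)) < n-1 then (1:Int) else -1))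
      = (if (j+1) % (2*(n-1)) < n-1 then (1:Int) else -1)) := by
  have hP : 2 ≤ 2*(n-1) := by omega
  have hlt := Nat.mod_lt j (show 0 < 2*(n-1) by omega)
  have hsucc := pv_mod_succ j (2*(n-1)) hP
  have hlt2 : (j+1) % (2*(n-1)) < 2*(n-1) := Nat.mod_lt _ (by omega)
  unfold pvWaveRow
  have hne : ¬ (n = 1) := by omega
  rw [if_neg hne, if_neg hne]
  generalize hgp : j % (2*(n-1)) = p at hsucc hlt ⊢
  generalize hgq : (j+1) % (2*(n-1)) = q at hsucc hlt2 ⊢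
  split_ifs at hsucc ⊢ <;> omega

theorem pv_wave_lt (n j : Nat) (hn : 2 ≤ n) : pvWaveRow n j < n := by
  have h := Nat.mod_lt j (show 0 < 2*(n-1) by omega)
  unfold pvWaveRow
  split_ifs <;> omega

theorem pv_lockstep (g : List (List (List Char))) (hn : 2 ≤ g.length) :
    ∀ (f : Nat) (j : Nat) (word : List Char) (out : List (List Char)),
      word = out.flatten →
      pvALoop g f ((pvWaveRow g.length j : Nat) : Int) (j : Int)
        (if j % (2*(g.length-1)) < g.length-1 then (1:Int) else -1) word
        = PySem.Chars.join [] (pvBLoop g f j out) := by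
  intro f
  induction f with
  | zero =>
    intro j word out hw
    simp [pvALoop, pvBLoop, pv_join_nil_eq_flatten, hw]
  | succ f ih =>
    intro j word out hw
    have hr : pvWaveRow g.length j < g.length := pv_wave_lt _ _ hn
    have hrow : pvRowA g ((pvWaveRow g.length j : Nat) : Int) = g[pvWaveRow g.length j] := by
      simp [pvRowA, List.getElem?_eq_getElem hr]
    have hgetD : g.getD (pvWaveRow g.length j) [] = g[pvWaveRow g.length j] :=
      List.getD_eq_getElem g [] hr
    rw [pvALoop, pvBLoop, hrow, hgetD]
    by_cases h : j < g[pvWaveRow g.length j].length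
    · have hA : 0 ≤ ((pvWaveRow g.length j : Nat) : Int) ∧
          ((pvWaveRow g.length j : Nat) : Int) < (g.length : Int) ∧
          (j : Int) < (g[pvWaveRow g.length j].length : Int) :=
        ⟨by positivity, by omega, by omega⟩
      have hI : 0 ≤ (j : Int) ∧ (j : Int) < (g[pvWaveRow g.length j].length : Int) :=
        ⟨by positivity, by omega⟩
      have hB : pvWaveRow g.length j < g.length ∧ j < g[pvWaveRow g.length j].length :=
        ⟨hr, h⟩
      rw [if_pos hA, if_pos hI, if_pos hB]
      have hx : (PySem.List.pyGet? g[pvWaveRow g.length j] (j : Int)).getD []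
          = g[pvWaveRow g.length j].getD j [] := by
        simp [List.getElem?_eq_getElem h]
      rw [hx]
      obtain ⟨hs1, hs2⟩ := pv_wave_step g.length j hn
      rw [hs2, hs1]
      have hj1 : ((j : Int) + 1) = ((j + 1 : Nat) : Int) := by omega
      rw [hj1]
      exact ih (j+1) _ _ (by simp [hw])
    · rw [if_neg (by push_cast; omega), if_neg (by tauto)]
      rw [hw, pv_join_nil_eq_flatten]

theorem pv_one_row (g : List (List (List Char))) (h1 : g.length = 1) :
    ∀ (f : Nat), pvALoop g f 0 0 1 [] = PySem.Chars.join [] (pvBLoop g f 0 []) := by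
  obtain ⟨row, rfl⟩ : ∃ row, g = [row] := by
    cases g with
    | nil => simp at h1
    | cons a t =>
      cases t with
      | nil => exact ⟨a, rfl⟩
      | cons b t' => simp at h1
  have stopA : ∀ (f : Nat) (w : List Char), pvALoop [row] f 1 1 1 w = w := by
    intro f w
    cases f with
    | zero => rfl
    | succ f => simp [pvALoop]
  have stopB : ∀ (f : Nat) (out : List (List Char)), pvBLoop [row] f 1 out = out := by
    intro f out
    cases f with
    | zero => rfl
    | succ f => simp [pvBLoop, pvWaveRow]
  intro f
  cases f with
  | zero => rfl
  | succ f =>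
    rw [pvALoop, pvBLoop]
    by_cases h : 0 < row.length
    · simp [pvRowA, pvWaveRow, PySem.List.pyGet?, PySem.List.pyIdx?, h, stopA, stopB]
    · simp [pvRowA, pvWaveRow, PySem.List.pyGet?, PySem.List.pyIdx?, h]

theorem pv_loops_eq (g : List (List (List Char))) (f : Nat) :
    pvALoop g f 0 0 1 [] = PySem.Chars.join [] (pvBLoop g f 0 []) := by
  rcases Nat.lt_or_ge g.length 2 with hlt | hge
  · rcases Nat.lt_or_ge g.length 1 with h0 | h1
    · obtain rfl : g = [] := List.length_eq_zero_iff.mp (by omega)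
      cases f with
      | zero => rfl
      | succ f => simp [pvALoop, pvBLoop, pvWaveRow]
    · exact pv_one_row g (by omega) f
  · have h2 : pvWaveRow g.length 0 = 0 := by
      unfold pvWaveRow
      rw [Nat.zero_mod]
      split_ifs <;> omega
    have hd : (if 0 % (2*(g.length-1)) < g.length-1 then (1:Int) else -1) = 1 := by
      rw [Nat.zero_mod, if_pos (by omega)]
    have hmain := pv_lockstep g hge f 0 [] [] rfl
    rw [h2, hd] at hmain
    simpa using hmain

-- ===== VERDICT (by name: the statement is the Claim_ definition above) =====
theorem get_diagonale_code_spec : Claim_equal_get_diagonale_code := by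
  intro grid _hdom
  unfold Spec_get_diagonale_code get_diagonale_code get_diagonale_code_alt
  exact congrArg String.ofList (pv_loops_eq _ _)
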